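-- pv_equiv track=rewrite | github.com/Kalliadickal/Academic-Progression-Guide | test/project.py | get_subject_class
-- ===== SOURCE A (Python) =====
-- def get_subject_class(subjects,smarks): #function to return the mark distribution
--     classd={}                       # of each subjects as a dictionary
--     for i in range(len(smarks)):
--         absent=0
--         pclass=0
--         fail=0
--         iiclass=0
--         iclass=0
--         distinct=0
--         for j in smarks[i]:
--             if j>=80:
--                 distinct=distinct+1
--             elif j>=60:
--                 iclass=iclass+1
--             elif j>=50:
--                 iiclass=iiclass+1
--             elif j>=40:
--                 pclass=pclass+1
--             elif j==-1:
--                 absent=absent+1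
--             else:
--                 fail=fail+1
--         classd[subjects[i]]=[absent,fail,pclass,iiclass,iclass,distinct]
--     return classd
-- ===== SOURCE B (Python) =====
-- def get_subject_class(subjects, smarks):
--     """Mark-distribution buckets per subject via cumulative threshold counts.
--
--     For each marks list, count how many marks fall below each boundary
--     (40, 50, 60, 80) in separate passes, then derive every bucket as a
--     difference of cumulative counts; absences (-1) are subtracted from the
--     below-40 total to give the fail count.
--     """
--     classd = {}
--     for sub, marks in zip(subjects, smarks):
--         absent = marks.count(-1)
--         b40 = sum(1 for j in marks if j < 40)
--         b50 = sum(1 for j in marks if j < 50)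
--         b60 = sum(1 for j in marks if j < 60)
--         b80 = sum(1 for j in marks if j < 80)
--         classd[sub] = [absent, b40 - absent, b50 - b40,
--                        b60 - b50, b80 - b60, len(marks) - b80]
--     return classd
-- ===== Notes on version B (the rewrite author's own statement) =====
-- stated objective: alternative
-- what changed: Replaces A's single-pass six-way branch binning with cumulative threshold counts (number of marks below 40/50/60/80 plus a count of -1 absences) from which each bucket is derived as a difference, and pairs subjects with mark lists via zip instead of indexing.
import Mathlib
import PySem

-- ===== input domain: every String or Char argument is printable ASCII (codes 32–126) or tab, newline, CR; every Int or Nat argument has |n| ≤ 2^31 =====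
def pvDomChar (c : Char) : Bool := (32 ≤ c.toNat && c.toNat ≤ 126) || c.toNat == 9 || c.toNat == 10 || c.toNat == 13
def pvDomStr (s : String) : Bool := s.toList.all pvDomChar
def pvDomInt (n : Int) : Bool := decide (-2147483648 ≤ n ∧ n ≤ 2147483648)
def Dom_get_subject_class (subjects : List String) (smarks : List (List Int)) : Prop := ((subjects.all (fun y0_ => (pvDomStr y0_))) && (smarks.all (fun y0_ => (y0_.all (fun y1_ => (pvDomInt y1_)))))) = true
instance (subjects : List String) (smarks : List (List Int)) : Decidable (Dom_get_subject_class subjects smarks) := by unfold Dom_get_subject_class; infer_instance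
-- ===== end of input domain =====

-- B replaces A's single-pass six-way branch binning by cumulative below-threshold counts
-- (below 40/50/60/80 plus a count of -1) whose differences give the buckets (objective: alternative).


-- ===== PORT A =====
-- inner 'for j in smarks[i]' with state (absent, fail, pclass, iiclass, iclass, distinct)
def pvStepA (s : Int × Int × Int × Int × Int × Int) (j : Int) : Int × Int × Int × Int × Int × Int :=
  match s with
  | (absent, fail, pclass, iiclass, iclass, distinct) =>
    if j ≥ 80 then (absent, fail, pclass, iiclass, iclass, distinct + 1)
    else if j ≥ 60 then (absent, fail, pclass, iiclass, iclass + 1, distinct)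
    else if j ≥ 50 then (absent, fail, pclass, iiclass + 1, iclass, distinct)
    else if j ≥ 40 then (absent, fail, pclass + 1, iiclass, iclass, distinct)
    else if j = -1 then (absent + 1, fail, pclass, iiclass, iclass, distinct)
    else (absent, fail + 1, pclass, iiclass, iclass, distinct)

def get_subject_class (subjects : List String) (smarks : List (List Int)) : List (String × List Int) :=
  ((PySem.List.pyRange 0 (smarks.length : Int) 1).foldl
    (fun (classd : PySem.Dict String (List Int)) i =>
      let t := (PySem.List.pyGetD smarks i []).foldl pvStepA (0, 0, 0, 0, 0, 0)
      classd.insert (PySem.List.pyGetD subjects i "")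
        [t.1, t.2.1, t.2.2.1, t.2.2.2.1, t.2.2.2.2.1, t.2.2.2.2.2])
    PySem.Dict.empty).items

-- ===== PORT B =====
def pvRowB (marks : List Int) : List Int :=
  let absent : Int := marks.count (-1)
  let b40 : Int := marks.countP (fun j => decide (j < 40))
  let b50 : Int := marks.countP (fun j => decide (j < 50))
  let b60 : Int := marks.countP (fun j => decide (j < 60))
  let b80 : Int := marks.countP (fun j => decide (j < 80))
  [absent, b40 - absent, b50 - b40, b60 - b50, b80 - b60, (marks.length : Int) - b80]

def get_subject_class_alt (subjects : List String) (smarks : List (List Int)) : List (String × List Int) :=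
  ((subjects.zip smarks).foldl
    (fun (classd : PySem.Dict String (List Int)) p => classd.insert p.1 (pvRowB p.2))
    PySem.Dict.empty).items

-- ===== PRECONDITION & SPEC =====
-- A indexes subjects[i] for every i < len(smarks): it raises IndexError when smarks is longer than subjects.
def Pre_get_subject_class (subjects : List String) (smarks : List (List Int)) : Prop :=
  smarks.length ≤ subjects.length
instance (subjects : List String) (smarks : List (List Int)) : Decidable (Pre_get_subject_class subjects smarks) := by unfold Pre_get_subject_class; infer_instance

def pvWitness_get_subject_class : List String × List (List Int) :=
  (["math", "cs"], [[95, 41, -1, 12], [55, 67]])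

def Spec_get_subject_class (subjects : List String) (smarks : List (List Int)) (out : List (String × List Int)) : Prop := out = get_subject_class_alt subjects smarks
instance (subjects : List String) (smarks : List (List Int)) (out : List (String × List Int)) : Decidable (Spec_get_subject_class subjects smarks out) := by unfold Spec_get_subject_class; infer_instance

-- ===== CLAIM (what is proved, stated in full; the proofs are below) =====
def Claim_equal_get_subject_class : Prop := ∀ (subjects : List String) (smarks : List (List Int)), Dom_get_subject_class subjects smarks → Pre_get_subject_class subjects smarks → Spec_get_subject_class subjects smarks (get_subject_class subjects smarks)

-- ===== LEMMAS AND PROOFS =====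

-- A's inner loop, fully characterised by counts of the branch conditions.
theorem pvStepA_foldl (l : List Int) (a f p ii ic d : Int) :
    l.foldl pvStepA (a, f, p, ii, ic, d) =
      (a + (l.count (-1) : Int),
       f + (l.countP (fun j => decide (j < 40) && !(j == -1)) : Int),
       p + (l.countP (fun j => decide (40 ≤ j) && decide (j < 50)) : Int),
       ii + (l.countP (fun j => decide (50 ≤ j) && decide (j < 60)) : Int),
       ic + (l.countP (fun j => decide (60 ≤ j) && decide (j < 80)) : Int),
       d + (l.countP (fun j => decide (80 ≤ j)) : Int)) := by
  induction l generalizing a f p ii ic d with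
  | nil => simp
  | cons x xs ih =>
    simp only [List.foldl_cons, pvStepA]
    split_ifs with h1 h2 h3 h4 h5 <;>
      · rw [ih]; clear ih
        refine Prod.ext ?_ (Prod.ext ?_ (Prod.ext ?_ (Prod.ext ?_ (Prod.ext ?_ ?_)))) <;>
        · simp only [List.count_cons, List.countP_cons]
          split_ifs <;>
          · simp only [beq_iff_eq, decide_eq_true_eq, Bool.and_eq_true, Bool.not_eq_true',
              beq_eq_false_iff_ne, ge_iff_le, not_le, not_and] at *
            push_cast
            omega

-- the cumulative-count identities behind B's differences
theorem pvCounts (l : List Int) :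
    ((l.countP (fun j => decide (j < 40) && !(j == -1)) : Int)
        = (l.countP (fun j => decide (j < 40)) : Int) - (l.count (-1) : Int))
    ∧ ((l.countP (fun j => decide (40 ≤ j) && decide (j < 50)) : Int)
        = (l.countP (fun j => decide (j < 50)) : Int) - (l.countP (fun j => decide (j < 40)) : Int))
    ∧ ((l.countP (fun j => decide (50 ≤ j) && decide (j < 60)) : Int)
        = (l.countP (fun j => decide (j < 60)) : Int) - (l.countP (fun j => decide (j < 50)) : Int))
    ∧ ((l.countP (fun j => decide (60 ≤ j) && decide (j < 80)) : Int)
        = (l.countP (fun j => decide (j < 80)) : Int) - (l.countP (fun j => decide (j < 60)) : Int))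
    ∧ ((l.countP (fun j => decide (80 ≤ j)) : Int)
        = (l.length : Int) - (l.countP (fun j => decide (j < 80)) : Int)) := by
  induction l with
  | nil => simp
  | cons x xs ih =>
    obtain ⟨i1, i2, i3, i4, i5⟩ := ih
    simp only [List.count_cons, List.countP_cons, List.length_cons]
    refine ⟨?_, ?_, ?_, ?_, ?_⟩ <;>
      · split_ifs <;>
        · simp only [beq_iff_eq, decide_eq_true_eq, Bool.and_eq_true, Bool.not_eq_true', beq_eq_false_iff_ne, not_le, not_and] at *
          push_cast
          omega

-- per-marks row equality: A's bucket list is B's difference list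
theorem pvRow_eq (marks : List Int) :
    (let t := marks.foldl pvStepA (0, 0, 0, 0, 0, 0)
     [t.1, t.2.1, t.2.2.1, t.2.2.2.1, t.2.2.2.2.1, t.2.2.2.2.2]) = pvRowB marks := by
  obtain ⟨i1, i2, i3, i4, i5⟩ := pvCounts marks
  simp only [pvStepA_foldl, pvRowB, zero_add]
  rw [i1, i2, i3, i4, i5]

-- outer loop: indexing fold over range(len(smarks)) equals the zip fold, prefix by prefix
theorem pv_outer (S : List String) (M : List (List Int)) (n : Nat)
    (hn : n ≤ M.length) (hSM : M.length ≤ S.length) (d : PySem.Dict String (List Int)) :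
    ((List.range n).foldl
      (fun (classd : PySem.Dict String (List Int)) (k : Nat) =>
        let t := (PySem.List.pyGetD M (k : Int) []).foldl pvStepA (0, 0, 0, 0, 0, 0)
        classd.insert (PySem.List.pyGetD S (k : Int) "")
          [t.1, t.2.1, t.2.2.1, t.2.2.2.1, t.2.2.2.2.1, t.2.2.2.2.2]) d)
    = (((S.zip M).take n).foldl
        (fun (classd : PySem.Dict String (List Int)) p => classd.insert p.1 (pvRowB p.2)) d) := by
  induction n generalizing d with
  | zero => simp
  | succ n ih =>
    have hlt : n < (S.zip M).length := by
      rw [List.length_zip]; omega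
    rw [List.range_succ, List.foldl_append, ih (by omega),
        List.take_add_one, List.foldl_append]
    have h1 : n < S.length := by omega
    have h2 : n < M.length := by omega
    have hget : (S.zip M)[n]? = some (S.getD n "", M.getD n []) := by
      rw [List.getElem?_eq_getElem hlt, List.getElem_zip,
          List.getD_eq_getElem S "" h1, List.getD_eq_getElem M [] h2]
    rw [hget]
    simp only [List.foldl_cons, List.foldl_nil, Option.toList_some,
      PySem.List.pyGetD_natCast]
    rw [← pvRow_eq (M.getD n [])]

-- ===== VERDICT (by name: the statement is the Claim_ definition above) =====
theorem get_subject_class_spec : Claim_equal_get_subject_class := by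
  intro subjects smarks _hDom hPre
  unfold Spec_get_subject_class get_subject_class get_subject_class_alt
  congr 1
  rw [PySem.List.pyRange_zero, Int.toNat_natCast, List.foldl_map]
  have h := pv_outer subjects smarks smarks.length le_rfl hPre PySem.Dict.empty
  rw [List.take_of_length_le (by rw [List.length_zip]; omega)] at h
  exact h
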